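-- pv_equiv track=rewrite | github.com/cheerfulinsanity/RankBot | filter_logic.py | is_solo_match
-- ===== SOURCE A (Python) =====
-- def is_solo_match(match, steam_id):
--     player_party = None
--     party_counts = {}
--
--     for player in match["players"]:
--         pid = player.get("partyId")
--         sid = player.get("steamAccountId")
--         if sid == steam_id:
--             player_party = pid
--         party_counts[pid] = party_counts.get(pid, 0) + 1
--
--     return player_party is not None and party_counts[player_party] == 1
-- ===== SOURCE B (Python) =====
-- def is_solo_match(match, steam_id):
--     # Reverse early-exit search for the player's party, then an early-exit
--     # duplicate detector; no counting dict.
--     party = None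
--     for player in reversed(match["players"]):
--         if player.get("steamAccountId") == steam_id:
--             party = player.get("partyId")
--             break
--     if party is None:
--         return False
--     seen = False
--     for p in match["players"]:
--         if p.get("partyId") == party:
--             if seen:
--                 return False
--             seen = True
--     return seen
-- ===== Notes on version B (the rewrite author's own statement) =====
-- stated objective: alternative
-- what changed: B drops A's party-count dict: a reverse scan with early exit finds the player's last-recorded party, then an early-exit duplicate detector over partyIds decides solo-ness, short-circuiting on the second member.
-- outside the precondition, e.g. on is_solo_match({}, 5): A raises KeyError, B raises KeyError
import Mathlib
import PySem

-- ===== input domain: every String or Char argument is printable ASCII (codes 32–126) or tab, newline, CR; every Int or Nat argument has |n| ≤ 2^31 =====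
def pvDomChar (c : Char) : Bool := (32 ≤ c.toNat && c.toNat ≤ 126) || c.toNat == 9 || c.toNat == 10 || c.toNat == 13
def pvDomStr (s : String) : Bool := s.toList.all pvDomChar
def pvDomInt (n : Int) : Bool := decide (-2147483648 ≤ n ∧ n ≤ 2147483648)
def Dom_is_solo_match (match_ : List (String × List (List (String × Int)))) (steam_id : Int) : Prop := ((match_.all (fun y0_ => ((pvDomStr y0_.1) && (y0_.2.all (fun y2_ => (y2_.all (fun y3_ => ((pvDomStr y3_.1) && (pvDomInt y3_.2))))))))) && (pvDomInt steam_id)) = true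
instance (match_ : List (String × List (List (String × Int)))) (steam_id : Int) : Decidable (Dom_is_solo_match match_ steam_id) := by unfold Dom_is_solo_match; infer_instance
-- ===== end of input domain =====

-- ===== PORT A =====
-- B replaces A's party-count dict with a reverse early-exit search plus an early-exit duplicate scan (alternative decomposition, no dict).
-- Pre_ excludes inputs whose "players" key is missing, where Python A raises KeyError.
def is_solo_match (match_ : List (String × List (List (String × Int)))) (steam_id : Int) : Bool :=
  let players := (PySem.Dict.mk match_).getD "players" []
  let st := players.foldl
    (fun (s : Option Int × PySem.Dict (Option Int) Int) pl =>
      let pid := (PySem.Dict.mk pl).get? "partyId"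
      let sid := (PySem.Dict.mk pl).get? "steamAccountId"
      let pp := if sid == some steam_id then pid else s.1
      (pp, s.2.insert pid (s.2.getD pid 0 + 1)))
    (none, PySem.Dict.empty)
  match st.1 with
  | none => false
  | some p => st.2.getD (some p) 0 == 1

-- ===== PORT B =====
-- the reversed early-exit search: first match of the reversed player list
def pvFindRev (steam_id : Int) : List (List (String × Int)) → Option Int
  | [] => none
  | pl :: rest =>
    if (PySem.Dict.mk pl).get? "steamAccountId" == some steam_id
    then (PySem.Dict.mk pl).get? "partyId"
    else pvFindRev steam_id rest

-- the early-exit duplicate detector over partyIds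
def pvSoloScan (party : Int) (seen : Bool) : List (List (String × Int)) → Bool
  | [] => seen
  | pl :: rest =>
    if (PySem.Dict.mk pl).get? "partyId" == some party then
      if seen then false else pvSoloScan party true rest
    else pvSoloScan party seen rest

def is_solo_match_alt (match_ : List (String × List (List (String × Int)))) (steam_id : Int) : Bool :=
  let players := (PySem.Dict.mk match_).getD "players" []
  match pvFindRev steam_id players.reverse with
  | none => false
  | some p => pvSoloScan p false players

-- ===== PRECONDITION & SPEC =====
-- Pre_ excludes only inputs with no "players" key, on which Python A raises KeyError.
def Pre_is_solo_match (match_ : List (String × List (List (String × Int)))) (steam_id : Int) : Prop :=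
  (PySem.Dict.mk match_).contains "players" = true
instance (match_ : List (String × List (List (String × Int)))) (steam_id : Int) : Decidable (Pre_is_solo_match match_ steam_id) := by unfold Pre_is_solo_match; infer_instance
def pvWitness_is_solo_match : (List (String × List (List (String × Int)))) × Int :=
  ([("players", [[("steamAccountId", 7), ("partyId", 1)]])], 7)
def Spec_is_solo_match (match_ : List (String × List (List (String × Int)))) (steam_id : Int) (out : Bool) : Prop := out = is_solo_match_alt match_ steam_id
instance (match_ : List (String × List (List (String × Int)))) (steam_id : Int) (out : Bool) : Decidable (Spec_is_solo_match match_ steam_id out) := by unfold Spec_is_solo_match; infer_instance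

-- ===== CLAIM (what is proved, stated in full; the proofs are below) =====
def Claim_equal_is_solo_match : Prop := ∀ (match_ : List (String × List (List (String × Int)))) (steam_id : Int), Dom_is_solo_match match_ steam_id → Pre_is_solo_match match_ steam_id → Spec_is_solo_match match_ steam_id (is_solo_match match_ steam_id)

-- ===== LEMMAS AND PROOFS =====

-- ghost version of pvFindRev distinguishing "no match" from "matched with party None" (proof-only)
def pvFindRevF (steam_id : Int) : List (List (String × Int)) → Option (Option Int)
  | [] => none
  | pl :: rest =>
    if (PySem.Dict.mk pl).get? "steamAccountId" == some steam_id
    then some ((PySem.Dict.mk pl).get? "partyId")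
    else pvFindRevF steam_id rest

-- pvFindRev is the ghost function with the two "None" outcomes conflated.
theorem pvFindRev_eq_F (steam_id : Int) (l : List (List (String × Int))) :
    pvFindRev steam_id l = (pvFindRevF steam_id l).bind id := by
  induction l with
  | nil => rfl
  | cons pl rest ih =>
    by_cases h : ((PySem.Dict.mk pl).get? "steamAccountId" == some steam_id) = true
    · simp [pvFindRev, pvFindRevF, h]
    · simp only [Bool.not_eq_true] at h
      simp [pvFindRev, pvFindRevF, h, ih]

-- snoc step for the ghost search: the appended element only matters when the prefix has no match.
theorem pvFindRevF_snoc (steam_id : Int) (xs : List (List (String × Int)))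
    (pl : List (String × Int)) :
    pvFindRevF steam_id (xs ++ [pl])
    = (match pvFindRevF steam_id xs with
       | some v => some v
       | none =>
         if (PySem.Dict.mk pl).get? "steamAccountId" == some steam_id
         then some ((PySem.Dict.mk pl).get? "partyId") else none) := by
  induction xs with
  | nil => simp [pvFindRevF]
  | cons x rest ih =>
    by_cases h : ((PySem.Dict.mk x).get? "steamAccountId" == some steam_id) = true
    · simp [pvFindRevF, h]
    · simp only [Bool.not_eq_true] at h
      simp [pvFindRevF, h, ih]

-- A's forward last-match fold is the ghost first-match of the reversed list.
theorem last_match_eq_findRevF (steam_id : Int) (players : List (List (String × Int)))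
    (s : Option Int) :
    players.foldl (fun a pl =>
        if (PySem.Dict.mk pl).get? "steamAccountId" == some steam_id
        then (PySem.Dict.mk pl).get? "partyId" else a) s
    = (match pvFindRevF steam_id players.reverse with
       | some pid => pid
       | none => s) := by
  induction players generalizing s with
  | nil => simp [pvFindRevF]
  | cons pl rest ih =>
    rw [List.foldl_cons, ih, List.reverse_cons, pvFindRevF_snoc]
    by_cases h : ((PySem.Dict.mk pl).get? "steamAccountId" == some steam_id) = true
    · cases hF : pvFindRevF steam_id rest.reverse <;> simp [h]
    · simp only [Bool.not_eq_true] at h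
      cases hF : pvFindRevF steam_id rest.reverse <;> simp [h]

-- A foldl over a product state whose components evolve independently splits into two foldls.
theorem foldl_prod_split {α β γ : Type} (l : List γ) (f : α → γ → α) (g : β → γ → β)
    (a : α) (b : β) :
    l.foldl (fun s x => (f s.1 x, g s.2 x)) (a, b) = (l.foldl f a, l.foldl g b) := by
  induction l generalizing a b with
  | nil => rfl
  | cons x xs ih => simp [List.foldl, ih]

-- The counter dict's entry at key k is the number of players whose partyId is k.
theorem counts_eq (players : List (List (String × Int))) (k : Option Int) :
    (players.foldl (fun (d : PySem.Dict (Option Int) Int) pl =>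
        d.insert ((PySem.Dict.mk pl).get? "partyId")
          (d.getD ((PySem.Dict.mk pl).get? "partyId") 0 + 1)) PySem.Dict.empty).getD k 0
    = (players.countP (fun pl => (PySem.Dict.mk pl).get? "partyId" == k) : Int) := by
  have h := PySem.Dict.getD_foldl_insert_add_one
    (l := players.map (fun pl => (PySem.Dict.mk pl).get? "partyId"))
    (d := (PySem.Dict.empty : PySem.Dict (Option Int) Int)) (v := k)
  rw [List.foldl_map] at h
  rw [h]
  simp [PySem.Dict.empty, PySem.Dict.getD, PySem.Dict.get?, List.count_eq_countP,
        List.countP_map, Function.comp_def]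

-- The early-exit duplicate scan decides whether the party occurs the required number of times.
theorem soloScan_eq_countP (party : Int) (players : List (List (String × Int))) (seen : Bool) :
    pvSoloScan party seen players
    = decide (players.countP (fun pl => (PySem.Dict.mk pl).get? "partyId" == some party)
              = if seen then 0 else 1) := by
  induction players generalizing seen with
  | nil => cases seen <;> simp [pvSoloScan]
  | cons pl rest ih =>
    by_cases h : ((PySem.Dict.mk pl).get? "partyId" == some party) = true
    · cases seen <;> simp [pvSoloScan, h, ih]
    · simp only [Bool.not_eq_true] at h
      simp [pvSoloScan, h, ih]

-- ===== VERDICT (by name: the statement is the Claim_ definition above) =====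
theorem is_solo_match_spec : Claim_equal_is_solo_match := by
  intro match_ steam_id _ _
  unfold Spec_is_solo_match is_solo_match is_solo_match_alt
  dsimp only
  set players := (PySem.Dict.mk match_).getD "players" [] with hp
  rw [foldl_prod_split players
    (fun (a : Option Int) pl =>
      if (PySem.Dict.mk pl).get? "steamAccountId" == some steam_id
      then (PySem.Dict.mk pl).get? "partyId" else a)
    (fun (d : PySem.Dict (Option Int) Int) pl =>
      d.insert ((PySem.Dict.mk pl).get? "partyId")
        (d.getD ((PySem.Dict.mk pl).get? "partyId") 0 + 1))
    none PySem.Dict.empty]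
  rw [last_match_eq_findRevF steam_id players none, pvFindRev_eq_F steam_id players.reverse]
  cases hF : pvFindRevF steam_id players.reverse with
  | none => simp
  | some pid =>
    cases pid with
    | none => simp
    | some p =>
      simp only [Option.bind, id_eq]
      rw [soloScan_eq_countP p players false]
      rw [counts_eq players (some p)]
      rw [Bool.eq_iff_iff]
      simp only [Bool.false_eq_true, if_false, beq_iff_eq, decide_eq_true_eq]
      omega
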